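-- pv_equiv track=rewrite | github.com/Daiten/codecademy | every_other_letter.py | every_other_letter
-- ===== SOURCE A (Python) =====
-- def every_other_letter(word):
--     counter = 2
--     new_word = ""
--     for letter in word:
--         if counter % 2 == 0:
--             new_word += letter
--             counter += 1
--         else:
--             counter += 1
--             continue
--     return new_word
-- ===== SOURCE B (Python) =====
-- def every_other_letter(word):
--     return word[::2]
-- ===== Notes on version B (the rewrite author's own statement) =====
-- stated objective: idiomatic
-- what changed: Replaced the counter-and-loop string accumulation with a single strided slice word[::2], which selects indices 0,2,4,... directly.
import Mathlib
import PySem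

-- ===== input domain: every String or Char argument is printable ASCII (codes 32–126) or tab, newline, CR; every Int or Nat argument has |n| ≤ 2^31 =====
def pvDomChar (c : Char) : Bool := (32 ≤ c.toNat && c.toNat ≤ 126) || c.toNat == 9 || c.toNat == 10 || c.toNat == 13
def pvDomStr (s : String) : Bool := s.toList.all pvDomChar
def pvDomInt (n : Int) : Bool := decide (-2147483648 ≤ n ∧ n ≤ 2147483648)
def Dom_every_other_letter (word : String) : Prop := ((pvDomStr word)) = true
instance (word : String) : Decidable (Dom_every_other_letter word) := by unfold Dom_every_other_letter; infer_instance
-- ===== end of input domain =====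

-- B replaces A's counter-and-loop character accumulation with the single strided slice word[::2] (idiomatic; a timing run measured it faster by a constant factor).

-- ===== PORT A =====
-- the loop body: even counter appends the letter, odd counter skips; counter always increments
def pvStepA (st : List Char × Int) (letter : Char) : List Char × Int :=
  if PySem.Int.mod st.2 2 == 0 then (st.1 ++ [letter], st.2 + 1) else (st.1, st.2 + 1)

def every_other_letter (word : String) : String :=
  String.ofList (word.toList.foldl pvStepA ([], 2)).1

-- ===== PORT B =====
-- word[::2]; step 2 ≠ 0 so the slice never raises — .getD "" only totalises the Option
def every_other_letter_alt (word : String) : String :=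
  (PySem.Str.slice? word none none 2).getD ""

-- ===== PRECONDITION & SPEC =====
def Spec_every_other_letter (word : String) (out : String) : Prop := out = every_other_letter_alt word
instance (word : String) (out : String) : Decidable (Spec_every_other_letter word out) := by unfold Spec_every_other_letter; infer_instance

-- ===== CLAIM (what is proved, stated in full; the proofs are below) =====
def Claim_equal_every_other_letter : Prop := ∀ (word : String), Dom_every_other_letter word → Spec_every_other_letter word (every_other_letter word)

-- ===== LEMMAS AND PROOFS =====

-- the characters at even indices, as a two-step structural recursion
def pvEvens {α : Type} : List α → List α
  | [] => []
  | [a] => [a]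
  | a :: _ :: t => a :: pvEvens t

theorem pvEvens_cons {α : Type} (a : α) (t : List α) :
    pvEvens (a :: t) = a :: pvEvens t.tail := by
  cases t <;> rfl

-- PySem.Int.mod with divisor 2 is %
theorem pvMod_two (x : Int) : PySem.Int.mod x 2 = x % 2 := by
  simp [PySem.Int.mod, Int.fmod_eq_emod]

-- A's loop, starting from any counter, appends exactly the even-index characters (tail-shifted if the counter is odd)
theorem pvLoopA_spec (l : List Char) : ∀ (acc : List Char) (c : Int),
    (l.foldl pvStepA (acc, c)).1 =
      acc ++ (if c % 2 = 0 then pvEvens l else pvEvens l.tail) := by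
  induction l with
  | nil => intro acc c; split <;> simp [pvEvens]
  | cons a t ih =>
    intro acc c
    by_cases h : c % 2 = 0
    · have h1 : ¬ (c + 1) % 2 = 0 := by omega
      simp only [List.foldl_cons, pvStepA, pvMod_two, h]
      simp only [beq_self_eq_true, if_pos, ih, h1, if_neg, pvEvens_cons, not_false_iff]
      simp
    · have h1 : (c + 1) % 2 = 0 := by omega
      simp only [List.foldl_cons, pvStepA, pvMod_two]
      rw [if_neg (by simpa using h)]
      simp only [ih, h1, if_pos, if_neg h, List.tail_cons]

-- the slice word[::2] computes the even-index characters
theorem pvFilterMap_evens {alpha : Type} (xs : List alpha) :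
    List.filterMap (fun k => xs[2 * k]?) (List.range ((xs.length + 1) / 2)) = pvEvens xs := by
  induction xs using pvEvens.induct with
  | case1 => simp [pvEvens]
  | case2 a => simp [pvEvens]
  | case3 a b t ih =>
    have hlen : ((a :: b :: t).length + 1) / 2 = (t.length + 1) / 2 + 1 := by
      simp [List.length_cons]; omega
    rw [hlen, List.range_succ_eq_map, List.filterMap_cons]
    have hstep : List.filterMap (fun k => (a :: b :: t)[2 * k]?)
          ((List.range ((t.length + 1) / 2)).map Nat.succ)
        = List.filterMap (fun k => t[2 * k]?) (List.range ((t.length + 1) / 2)) := by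
      rw [List.filterMap_map]
      apply List.filterMap_congr
      intro k _
      show (a :: b :: t)[2 * (k + 1)]? = t[2 * k]?
      rw [show 2 * (k + 1) = 2 * k + 1 + 1 by ring]
      simp
    rw [hstep, ih]
    rfl

theorem pvSlice_two {alpha : Type} (xs : List alpha) :
    PySem.List.slice? xs none none 2 = some (pvEvens xs) := by
  simp only [PySem.List.slice?, PySem.List.sliceIndices]
  norm_num
  have hcount : (if 0 < xs.length then (((xs.length : Int) + 2 - 1) / 2).toNat else 0)
      = (xs.length + 1) / 2 := by
    split <;> omega
  rw [hcount, ← pvFilterMap_evens]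
  apply List.filterMap_congr
  intro k _
  congr 1

-- ===== VERDICT (by name: the statement is the Claim_ definition above) =====
theorem every_other_letter_spec : Claim_equal_every_other_letter := by
  intro word _
  unfold Spec_every_other_letter every_other_letter every_other_letter_alt
  rw [PySem.Str.slice?, PySem.Chars.slice?_eq_listSlice?, pvSlice_two, Option.map_some, Option.getD_some]
  rw [pvLoopA_spec, if_pos (by decide)]
  simp
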